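-- pv_equiv track=rewrite | github.com/pgrobasillobre/FQsolver | tests/runtest.py | _remove_filtered_blocks
-- ===== SOURCE A (Python) =====
-- def _remove_filtered_blocks(text, filter_specs):
--     lines = text.splitlines()
--     keep = [True] * len(lines)
--
--     for spec in filter_specs:
--         start = spec.get("from_string")
--         end = spec.get("to_string")
--         if not start or not end:
--             continue
--
--         in_block = False
--         for idx, line in enumerate(lines):
--             if start in line:
--                 in_block = True
--             if in_block:
--                 keep[idx] = False
--             if in_block and end in line:
--                 in_block = False
--
--     filtered = [line for idx, line in enumerate(lines) if keep[idx]]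
--     return "\n".join(filtered) + ("\n" if text.endswith("\n") else "")
-- ===== SOURCE B (Python) =====
-- def _remove_filtered_blocks(text, filter_specs):
--     # Single pass over the lines, threading all active specs' in-block flags at once.
--     active = []
--     for spec in filter_specs:
--         start = spec.get("from_string")
--         end = spec.get("to_string")
--         if start and end:
--             active.append((start, end))
--
--     flags = [False] * len(active)
--     out = []
--     for line in text.splitlines():
--         drop = False
--         for i, (start, end) in enumerate(active):
--             f = flags[i] or (start in line)
--             if f:
--                 drop = True
--                 if end in line:
--                     f = False
--             flags[i] = f
--         if not drop:
--             out.append(line)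
--     return "\n".join(out) + ("\n" if text.endswith("\n") else "")
-- ===== Notes on version B (the rewrite author's own statement) =====
-- stated objective: alternative
-- what changed: B filters the specs to the active (non-empty start/end) pairs once and then makes a single pass over the lines threading all specs' in-block flags simultaneously, instead of A's per-spec rescans of the whole line list into a keep[] array indexed via enumerate.
import Mathlib
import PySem

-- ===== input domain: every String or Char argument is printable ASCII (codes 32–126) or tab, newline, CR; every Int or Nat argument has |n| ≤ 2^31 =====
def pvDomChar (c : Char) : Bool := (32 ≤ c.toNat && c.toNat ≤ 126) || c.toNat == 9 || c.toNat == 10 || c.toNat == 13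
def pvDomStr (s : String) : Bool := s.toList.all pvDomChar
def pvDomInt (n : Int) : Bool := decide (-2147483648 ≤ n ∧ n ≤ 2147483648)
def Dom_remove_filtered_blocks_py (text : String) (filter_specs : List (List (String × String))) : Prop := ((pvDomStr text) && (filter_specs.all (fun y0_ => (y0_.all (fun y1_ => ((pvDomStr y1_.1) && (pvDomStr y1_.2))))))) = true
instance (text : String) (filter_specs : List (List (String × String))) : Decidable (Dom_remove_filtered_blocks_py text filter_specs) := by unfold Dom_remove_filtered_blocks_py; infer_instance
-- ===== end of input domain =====

-- B makes one pass over the lines threading all active specs' block flags at once, instead of rescanning all lines once per spec (objective: alternative decomposition, same asymptotic cost).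


-- ===== PORT A =====
-- body of A's inner 'for idx, line in enumerate(lines)' loop
def pvAStep (s e : String) (st : List Bool × Bool) (p : Int × String) : List Bool × Bool :=
  let in_block := if PySem.Str.isIn s p.2 then true else st.2
  let keep := if in_block then st.1.set p.1.toNat false else st.1
  let in_block := if in_block && PySem.Str.isIn e p.2 then false else in_block
  (keep, in_block)

def pvAInner (s e : String) (lines : List String) (keep : List Bool) : List Bool × Bool :=
  (PySem.List.enumerate lines 0).foldl (pvAStep s e) (keep, false)

def remove_filtered_blocks_py (text : String) (filter_specs : List (List (String × String))) : String :=
  let lines := PySem.Str.splitlines text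
  let keep := List.replicate lines.length true
  let keep := filter_specs.foldl
    (fun keep spec =>
      match List.lookup "from_string" spec, List.lookup "to_string" spec with
      | some s, some e => if s = "" || e = "" then keep else (pvAInner s e lines keep).1
      | _, _ => keep)
    keep
  let filtered := (PySem.List.enumerate lines 0).filterMap
    (fun p => if PySem.List.pyGetD keep p.1 false then some p.2 else none)
  PySem.Str.join "\n" filtered ++ (if PySem.Str.endswith text "\n" then "\n" else "")

-- ===== PORT B =====
-- per-line update of all specs' flags: returns (drop this line?, new flags)
def pvBLine (line : String) : List Bool → List (String × String) → Bool × List Bool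
  | f :: fs, (s, e) :: rest =>
    let f1 := f || PySem.Str.isIn s line
    let r := pvBLine line fs rest
    (f1 || r.1, (if f1 && PySem.Str.isIn e line then false else f1) :: r.2)
  | _, _ => (false, [])

-- the single sweep over the lines
def pvBLoop (active : List (String × String)) : List String → List Bool → List String
  | [], _ => []
  | l :: ls, flags =>
    let r := pvBLine l flags active
    if r.1 then pvBLoop active ls r.2 else l :: pvBLoop active ls r.2

def remove_filtered_blocks_py_alt (text : String) (filter_specs : List (List (String × String))) : String :=
  let active := filter_specs.filterMap
    (fun spec =>
      (List.lookup "from_string" spec).bind fun s =>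
        (List.lookup "to_string" spec).bind fun e =>
          if s = "" || e = "" then none else some (s, e))
  let out := pvBLoop active (PySem.Str.splitlines text) (List.replicate active.length false)
  PySem.Str.join "\n" out ++ (if PySem.Str.endswith text "\n" then "\n" else "")

-- ===== PRECONDITION & SPEC =====
def Spec_remove_filtered_blocks_py (text : String) (filter_specs : List (List (String × String))) (out : String) : Prop := out = remove_filtered_blocks_py_alt text filter_specs
instance (text : String) (filter_specs : List (List (String × String))) (out : String) : Decidable (Spec_remove_filtered_blocks_py text filter_specs out) := by unfold Spec_remove_filtered_blocks_py; infer_instance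

-- ===== CLAIM (what is proved, stated in full; the proofs are below) =====
def Claim_equal_remove_filtered_blocks_py : Prop := ∀ (text : String) (filter_specs : List (List (String × String))), Dom_remove_filtered_blocks_py text filter_specs → Spec_remove_filtered_blocks_py text filter_specs (remove_filtered_blocks_py text filter_specs)

-- ===== LEMMAS AND PROOFS =====

-- per-spec sequence of "this line is inside a removed block" decisions, and the final flag
def pvScan (s e : String) : List String → Bool → List Bool
  | [], _ => []
  | l :: ls, b =>
    let f := if PySem.Str.isIn s l then true else b
    f :: pvScan s e ls (if f && PySem.Str.isIn e l then false else f)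

def pvScanFin (s e : String) : List String → Bool → Bool
  | [], b => b
  | l :: ls, b =>
    let f := if PySem.Str.isIn s l then true else b
    pvScanFin s e ls (if f && PySem.Str.isIn e l then false else f)

-- combined per-line drop decisions of B's sweep
def pvMulti (active : List (String × String)) : List String → List Bool → List Bool
  | [], _ => []
  | l :: ls, flags => (pvBLine l flags active).1 :: pvMulti active ls (pvBLine l flags active).2

-- how the specs of A's outer loop map to B's active list
def pvActive (filter_specs : List (List (String × String))) : List (String × String) :=
  filter_specs.filterMap
    (fun spec =>
      (List.lookup "from_string" spec).bind fun s =>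
        (List.lookup "to_string" spec).bind fun e =>
          if s = "" || e = "" then none else some (s, e))

def pvDamp (k d : Bool) : Bool := if d then false else k

theorem pvScan_length (s e : String) (lines : List String) (b : Bool) :
    (pvScan s e lines b).length = lines.length := by
  induction lines generalizing b with
  | nil => rfl
  | cons l ls ih => simp [pvScan, ih]

theorem pvBLoop_eq_filter (active : List (String × String)) (lines : List String) (flags : List Bool) :
    pvBLoop active lines flags
      = (lines.zip (pvMulti active lines flags)).filterMap
          (fun p => if p.2 then none else some p.1) := by
  induction lines generalizing flags with
  | nil => rfl
  | cons l ls ih =>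
    simp only [pvBLoop, pvMulti, List.zip_cons_cons, List.filterMap_cons]
    by_cases h : (pvBLine l flags active).1 = true
    · simp [h, ih]
    · simp only [Bool.not_eq_true] at h; simp [h, ih]

theorem pvMulti_nil (lines : List String) (flags : List Bool) :
    pvMulti [] lines flags = lines.map (fun _ => false) := by
  induction lines generalizing flags with
  | nil => rfl
  | cons l ls ih => simp [pvMulti, pvBLine, ih]

theorem pvMulti_cons (s e : String) (rest : List (String × String))
    (lines : List String) (b : Bool) (bs : List Bool) :
    pvMulti ((s, e) :: rest) lines (b :: bs)
      = List.zipWith (· || ·) (pvScan s e lines b) (pvMulti rest lines bs) := by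
  induction lines generalizing b bs with
  | nil => rfl
  | cons l ls ih =>
    simp only [pvMulti, pvScan, pvBLine]
    cases hs : PySem.Str.isIn s l <;> cases he : PySem.Str.isIn e l <;>
      cases b <;> simp [ih]

-- A's inner loop applies one spec's drop decisions pointwise to the keep list
theorem pvAInner_go (s e : String) (lines : List String) (pre keep : List Bool) (b : Bool)
    (h : keep.length = lines.length) :
    (PySem.List.enumerate lines (pre.length : Int)).foldl (pvAStep s e) (pre ++ keep, b)
      = (pre ++ List.zipWith pvDamp keep (pvScan s e lines b), pvScanFin s e lines b) := by
  induction lines generalizing pre keep b with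
  | nil =>
    cases keep with
    | nil => simp [PySem.List.enumerate_nil, pvScan, pvScanFin]
    | cons k ks => simp at h
  | cons l ls ih =>
    cases keep with
    | nil => simp at h
    | cons k ks =>
      rw [PySem.List.enumerate_cons, List.foldl_cons]
      have hset : ∀ x : Bool, (pre ++ k :: ks).set pre.length x = pre ++ x :: ks := by
        intro x; rw [List.set_append]; simp
      have hlen : ks.length = ls.length := by simpa using h
      have ih' : ∀ (y b' : Bool),
          List.foldl (pvAStep s e) (pre ++ y :: ks, b') (PySem.List.enumerate ls ((pre.length : Int) + 1))
            = (pre ++ y :: List.zipWith pvDamp ks (pvScan s e ls b'), pvScanFin s e ls b') := by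
        intro y b'
        have := ih (pre ++ [y]) ks b' hlen
        simpa using this
      cases hs : PySem.Str.isIn s l <;> cases he : PySem.Str.isIn e l <;> cases b <;>
        simp only [PySem.Str.isIn_eq] at hs he <;>
        simp [pvAStep, hs, he, hset, pvScan, pvScanFin, pvDamp, ih']

theorem pvAInner_eq (s e : String) (lines : List String) (keep : List Bool)
    (h : keep.length = lines.length) :
    (pvAInner s e lines keep).1
      = List.zipWith pvDamp keep (pvScan s e lines false) := by
  have := pvAInner_go s e lines [] keep false h
  rw [show ((([] : List Bool).length : Nat) : Int) = 0 from rfl, List.nil_append,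
    List.nil_append] at this
  exact congrArg Prod.fst this

theorem pvDamp_or (keep d1 d2 : List Bool) :
    List.zipWith pvDamp (List.zipWith pvDamp keep d1) d2
      = List.zipWith pvDamp keep (List.zipWith (· || ·) d1 d2) := by
  induction keep generalizing d1 d2 with
  | nil => simp
  | cons k ks ih =>
    cases d1 with
    | nil => simp
    | cons a as =>
      cases d2 with
      | nil => simp
      | cons c cs =>
        simp only [List.zipWith_cons_cons, ih]
        cases a <;> cases c <;> simp [pvDamp]

theorem pvMulti_length (active : List (String × String)) (lines : List String) (flags : List Bool) :
    (pvMulti active lines flags).length = lines.length := by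
  induction lines generalizing flags with
  | nil => rfl
  | cons l ls ih => simp [pvMulti, ih]

theorem pvDamp_const_false (keep : List Bool) (n : Nat) (h : keep.length = n) :
    List.zipWith pvDamp keep (List.replicate n false) = keep := by
  induction keep generalizing n with
  | nil => simp
  | cons k ks ih =>
    cases n with
    | zero => simp at h
    | succ m =>
      rw [List.replicate_succ, List.zipWith_cons_cons, ih m (by simpa using h)]
      simp [pvDamp]

-- A's outer loop over the specs computes the pointwise damping by B's combined drops
theorem pvOuter (lines : List String) (specs : List (List (String × String))) (keep : List Bool)
    (h : keep.length = lines.length) :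
    specs.foldl
      (fun keep spec =>
        match List.lookup "from_string" spec, List.lookup "to_string" spec with
        | some s, some e => if s = "" || e = "" then keep else (pvAInner s e lines keep).1
        | _, _ => keep)
      keep
    = List.zipWith pvDamp keep
        (pvMulti (pvActive specs) lines (List.replicate (pvActive specs).length false)) := by
  induction specs generalizing keep with
  | nil =>
    rw [List.foldl_nil, show pvActive [] = [] from rfl, pvMulti_nil, List.map_const']
    exact (pvDamp_const_false keep lines.length h).symm
  | cons spec rest ih =>
    rw [List.foldl_cons]
    rcases hf : List.lookup "from_string" spec with _ | s
    · have hact : pvActive (spec :: rest) = pvActive rest := by simp [pvActive, hf]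
      rw [hact]; exact ih keep h
    rcases ht : List.lookup "to_string" spec with _ | e
    · have hact : pvActive (spec :: rest) = pvActive rest := by simp [pvActive, hf, ht]
      rw [hact]; exact ih keep h
    by_cases hse : s = "" ∨ e = ""
    · have hact : pvActive (spec :: rest) = pvActive rest := by
        simp only [pvActive, List.filterMap_cons, hf, ht, Option.bind_some]
        rw [if_pos (by simpa using hse)]
      rw [hact]; dsimp only
      rw [if_pos (by simpa using hse)]
      exact ih keep h
    · have hact : pvActive (spec :: rest) = (s, e) :: pvActive rest := by
        simp only [pvActive, List.filterMap_cons, hf, ht, Option.bind_some]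
        rw [if_neg (by simpa using hse)]
      dsimp only
      rw [if_neg (by simpa using hse)]
      rw [pvAInner_eq s e lines keep h]
      rw [ih _ (by simp [pvScan_length, h])]
      rw [hact, pvDamp_or]
      rw [List.length_cons, List.replicate_succ, pvMulti_cons]

-- damping an all-true keep list is pointwise negation
theorem pvDamp_replicate_true (ds : List Bool) (n : Nat) (h : ds.length = n) :
    List.zipWith pvDamp (List.replicate n true) ds = ds.map (fun d => !d) := by
  induction ds generalizing n with
  | nil => simp
  | cons d ds ih =>
    cases n with
    | zero => simp at h
    | succ m => simp only [List.replicate_succ, List.zipWith_cons_cons, List.map_cons,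
                  ih m (by simpa using h)]
                cases d <;> simp [pvDamp]

-- A's final enumerate/indexing comprehension is a zip filter
theorem pvFilt (lines : List String) (keep pre : List Bool) (h : keep.length = lines.length) :
    (PySem.List.enumerate lines ((pre.length : Nat) : Int)).filterMap
      (fun p => if PySem.List.pyGetD (pre ++ keep) p.1 false then some p.2 else none)
      = (lines.zip keep).filterMap (fun p => if p.2 then some p.1 else none) := by
  induction lines generalizing pre keep with
  | nil =>
    cases keep with
    | nil => simp [PySem.List.enumerate_nil]
    | cons k ks => simp at h
  | cons l ls ih =>
    cases keep with
    | nil => simp at h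
    | cons k ks =>
      rw [PySem.List.enumerate_cons, List.filterMap_cons]
      have hget : PySem.List.pyGetD (pre ++ k :: ks) ((pre.length : Nat) : Int) false = k := by
        rw [PySem.List.pyGetD_natCast]
        simp [List.getD]
      have step := ih ks (pre ++ [k]) (by simpa using h)
      simp only [List.length_append, List.length_cons, List.length_nil, Nat.zero_add,
        List.append_assoc, List.cons_append, List.nil_append, Nat.cast_add, Nat.cast_one] at step
      rw [hget, step]
      cases k <;> simp
      
-- keep-filtering by negated drops equals drop-filtering
theorem pvNegFilt (lines : List String) (ds : List Bool) :
    (lines.zip (ds.map (fun d => !d))).filterMap (fun p => if p.2 then some p.1 else none)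
      = (lines.zip ds).filterMap (fun p => if p.2 then none else some p.1) := by
  induction lines generalizing ds with
  | nil => simp
  | cons l ls ih =>
    cases ds with
    | nil => simp
    | cons d dd =>
      simp only [List.map_cons, List.zip_cons_cons, List.filterMap_cons, ih]
      cases d <;> simp

-- ===== VERDICT (by name: the statement is the Claim_ definition above) =====
theorem remove_filtered_blocks_py_spec : Claim_equal_remove_filtered_blocks_py := by
  intro text filter_specs _
  simp only [Spec_remove_filtered_blocks_py, remove_filtered_blocks_py, remove_filtered_blocks_py_alt]
  rw [pvOuter (PySem.Str.splitlines text) filter_specs _ (by simp)]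
  rw [pvDamp_replicate_true _ _ (pvMulti_length _ _ _)]
  rw [pvBLoop_eq_filter]
  congr 1
  have hfilt := pvFilt (PySem.Str.splitlines text)
      ((pvMulti (pvActive filter_specs) (PySem.Str.splitlines text)
        (List.replicate (pvActive filter_specs).length false)).map (fun d => !d)) []
      (by simp [pvMulti_length])
  rw [List.nil_append] at hfilt
  exact congrArg (PySem.Str.join "\n") (hfilt.trans (pvNegFilt _ _))
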